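-- pv_equiv track=rewrite | github.com/wuggy-ianw/AdventOfCode | Day20/day20.py | invert_nonoverlapping_sorted_ranges
-- ===== SOURCE A (Python) =====
-- def invert_nonoverlapping_sorted_ranges(ranges, limit=(2 ** 32) - 1):
--     """
--     Given some nonoverlapping sorted ranges, invert them (i.e. invert an 'excluded' set
--     of ranges to be an 'included' set of ranges).
--
--     :param ranges: A list of tuple(lower,upper) of ranges, such that no range overlaps with another and they're
--                     sorted in increasing order of 'lower'
--     :param limit: The last value in the permitted set of value. Used to create a 'final' included range if ranges
--                     doesn't exclude all the way to the limit value.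
--     :return: A list of tuples(lower,upper) of ranges which are the values between 0 and limit that are NOT in
--                 any of the input ranges.
--     """
--     inverted_ranges = []
--     current_first_included = 0
--     for lower, upper in ranges:
--         if lower>current_first_included:
--             # we need to include a range from first_included to lower-1
--             inverted_ranges.append((current_first_included, lower - 1))
--             current_first_included = upper + 1
--
--         current_first_included = upper + 1
--
--     # check if we have to include a range at the end up to the limit
--     if current_first_included<=limit:
--         inverted_ranges.append((current_first_included, limit))
--
--     return inverted_ranges
-- ===== SOURCE B (Python) =====
-- def invert_nonoverlapping_sorted_ranges(ranges, limit=(2 ** 32) - 1):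
--     starts = [0] + [upper + 1 for _, upper in ranges]
--     ends = [lower - 1 for lower, _ in ranges] + [limit]
--     return [(s, e) for s, e in zip(starts, ends) if s <= e]
-- ===== Notes on version B (the rewrite author's own statement) =====
-- stated objective: simpler
-- what changed: Replaces the running-watermark loop with materialised boundary lists (gap starts = 0 and each upper+1, gap ends = each lower-1 and limit) zipped and filtered by s <= e.
import Mathlib
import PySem

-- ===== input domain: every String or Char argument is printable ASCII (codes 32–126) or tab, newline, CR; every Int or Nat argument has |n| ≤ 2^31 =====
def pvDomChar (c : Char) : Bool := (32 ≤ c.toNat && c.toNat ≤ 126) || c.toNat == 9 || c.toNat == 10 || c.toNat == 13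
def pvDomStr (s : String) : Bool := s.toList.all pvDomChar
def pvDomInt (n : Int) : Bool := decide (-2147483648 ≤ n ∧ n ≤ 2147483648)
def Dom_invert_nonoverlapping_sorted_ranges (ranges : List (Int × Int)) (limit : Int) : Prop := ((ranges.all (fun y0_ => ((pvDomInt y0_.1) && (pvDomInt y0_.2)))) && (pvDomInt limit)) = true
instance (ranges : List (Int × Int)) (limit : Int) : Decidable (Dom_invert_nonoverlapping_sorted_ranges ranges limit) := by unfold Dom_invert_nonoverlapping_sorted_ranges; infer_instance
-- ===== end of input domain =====

-- B replaces A's running-watermark loop with boundary lists zipped and filtered (objective: simpler).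

-- ===== PORT A =====
-- Literal port of A: fold over ranges carrying (inverted_ranges, current_first_included);
-- the unconditional reassignment `current_first_included = upper + 1` after the if is kept
-- by producing state (inv', upper + 1) in both branches.
def invert_nonoverlapping_sorted_ranges (ranges : List (Int × Int)) (limit : Int) : List (Int × Int) :=
  let st := ranges.foldl
    (fun (st : List (Int × Int) × Int) (r : Int × Int) =>
      let inv := st.1
      let current_first_included := st.2
      let lower := r.1
      let upper := r.2
      let inv := if lower > current_first_included then inv ++ [(current_first_included, lower - 1)] else inv
      (inv, upper + 1))
    ([], 0)
  if st.2 ≤ limit then st.1 ++ [(st.2, limit)] else st.1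

-- ===== PORT B =====
def invert_nonoverlapping_sorted_ranges_alt (ranges : List (Int × Int)) (limit : Int) : List (Int × Int) :=
  let starts : List Int := 0 :: ranges.map (fun r => r.2 + 1)
  let ends : List Int := ranges.map (fun r => r.1 - 1) ++ [limit]
  (starts.zip ends).filter (fun p => p.1 ≤ p.2)

-- ===== PRECONDITION & SPEC =====
def Spec_invert_nonoverlapping_sorted_ranges (ranges : List (Int × Int)) (limit : Int) (out : List (Int × Int)) : Prop := out = invert_nonoverlapping_sorted_ranges_alt ranges limit
instance (ranges : List (Int × Int)) (limit : Int) (out : List (Int × Int)) : Decidable (Spec_invert_nonoverlapping_sorted_ranges ranges limit out) := by unfold Spec_invert_nonoverlapping_sorted_ranges; infer_instance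

-- ===== CLAIM (what is proved, stated in full; the proofs are below) =====
def Claim_equal_invert_nonoverlapping_sorted_ranges : Prop := ∀ (ranges : List (Int × Int)) (limit : Int), Dom_invert_nonoverlapping_sorted_ranges ranges limit → Spec_invert_nonoverlapping_sorted_ranges ranges limit (invert_nonoverlapping_sorted_ranges ranges limit)

-- ===== LEMMAS AND PROOFS =====

-- Loop invariant: starting A's fold from accumulator `acc` and watermark `c`, the finished
-- result equals `acc` followed by B's filtered zip seeded with start `c`.
theorem invert_fold_eq (ranges : List (Int × Int)) (limit : Int) :
    ∀ (acc : List (Int × Int)) (c : Int),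
    (let st := ranges.foldl
      (fun (st : List (Int × Int) × Int) (r : Int × Int) =>
        let inv := st.1
        let current_first_included := st.2
        let lower := r.1
        let upper := r.2
        let inv := if lower > current_first_included then inv ++ [(current_first_included, lower - 1)] else inv
        (inv, upper + 1))
      (acc, c)
     if st.2 ≤ limit then st.1 ++ [(st.2, limit)] else st.1)
    = acc ++ ((c :: ranges.map (fun r => r.2 + 1)).zip (ranges.map (fun r => r.1 - 1) ++ [limit])).filter (fun p => p.1 ≤ p.2) := by
  induction ranges with
  | nil =>
      intro acc c
      simp only [List.foldl, List.map, List.zip]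
      by_cases h : c ≤ limit
      · simp [h]
      · simp [h]
  | cons r rs ih =>
      intro acc c
      simp only [List.foldl, List.map, List.zip]
      rw [ih]
      by_cases h : r.1 > c
      · have h' : c ≤ r.1 - 1 := by omega
        simp [h, h', List.zip]
      · have h' : ¬ (c ≤ r.1 - 1) := by omega
        simp [h, h', List.zip]

-- ===== VERDICT (by name: the statement is the Claim_ definition above) =====
theorem invert_nonoverlapping_sorted_ranges_spec : Claim_equal_invert_nonoverlapping_sorted_ranges := by
  intro ranges limit _
  unfold Spec_invert_nonoverlapping_sorted_ranges invert_nonoverlapping_sorted_ranges invert_nonoverlapping_sorted_ranges_alt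
  exact invert_fold_eq ranges limit [] 0
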